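-- pv_equiv track=rewrite | github.com/brodiecc/decoder-comparison | graphs/construct_gstar.py | boundary_only_positions
-- ===== SOURCE A (Python) =====
-- from typing import Dict, List, Tuple, Optional, Iterable
-- from typing import Dict, List, Tuple
--
-- def diamond_row_sizes(L: int) -> List[int]:
--     """
--     For odd L (>=3):
--       rowsizes = [1,3,...,L, L, ...,3,1] with length L+1.
--     Example L=5: [1,3,5,5,3,1]
--     """
--     if L % 2 == 0 or L < 3:
--         raise ValueError("L must be odd and >= 3")
--     d = (L - 1) // 2
--     up = [2 * i + 1 for i in range(d + 1)]  # 1..L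
--     down = [2 * i + 1 for i in range(d - 1, -1, -1)]  # L-2..1
--     return up + [L] + down  # duplicate max row -> L+1 rows
--
-- def boundary_only_positions(L: int) -> set[tuple[int, int]]:
--     """
--     One boundary-only vertex per row:
--       - rightmost on rows up to the *first* max-width row (inclusive)
--       - leftmost starting from the next row (second max row and beyond)
--
--     For L=5 rowsizes [1,3,5,5,3,1]:
--       y=0,1,2 -> rightmost
--       y=3,4,5 -> leftmost
--     """
--     rows = diamond_row_sizes(L)
--
--     plateau_ys = [y for y, m in enumerate(rows) if m == L]
--     if not plateau_ys:
--         raise ValueError("No plateau row found; check diamond_row_sizes.")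
--     y_first_max = min(plateau_ys)  # <-- key change (was max)
--
--     b: set[tuple[int, int]] = set()
--     for y, m in enumerate(rows):
--         if y > y_first_max:
--             b.add((-(m // 2), y))  # leftmost
--         else:
--             b.add((+(m // 2), y))  # rightmost
--     return b
-- ===== SOURCE B (Python) =====
-- def boundary_only_positions(L: int) -> set[tuple[int, int]]:
--     if L % 2 == 0 or L < 3:
--         raise ValueError("L must be odd and >= 3")
--     d = (L - 1) // 2
--     b: set[tuple[int, int]] = set()
--     for y in range(L + 1):
--         c = min(y, L - y)
--         b.add((-c, y) if y > d else (c, y))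
--     return b
-- ===== Notes on version B (the rewrite author's own statement) =====
-- stated objective: simpler
-- what changed: B drops the diamond_row_sizes list and the plateau scan entirely: it validates L up front, takes the split row d=(L-1)//2 in closed form, and emits each boundary vertex in one pass using c=min(y,L-y) instead of indexing a prebuilt row-width list.
import Mathlib
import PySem

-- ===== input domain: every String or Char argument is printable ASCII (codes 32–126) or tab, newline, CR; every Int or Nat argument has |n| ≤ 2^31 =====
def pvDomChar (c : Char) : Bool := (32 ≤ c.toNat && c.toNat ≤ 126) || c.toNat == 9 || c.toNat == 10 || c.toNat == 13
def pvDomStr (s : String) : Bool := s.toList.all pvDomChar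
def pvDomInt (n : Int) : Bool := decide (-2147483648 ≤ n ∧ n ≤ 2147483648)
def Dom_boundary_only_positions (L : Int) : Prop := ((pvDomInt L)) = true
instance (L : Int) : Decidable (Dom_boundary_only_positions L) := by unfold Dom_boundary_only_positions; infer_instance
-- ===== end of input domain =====

-- B replaces A's precomputed row-size list and plateau scan with a one-pass closed-form emission (objective: simpler).

-- ===== PORT A =====
-- helper: diamond_row_sizes (the ValueError branch is unreachable under Pre_; port returns [])
def diamond_row_sizes (L : Int) : List Int :=
  if PySem.Int.mod L 2 = 0 ∨ L < 3 then []
  else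
    let d := PySem.Int.floordiv (L - 1) 2
    let up := (PySem.List.pyRange 0 (d + 1) 1).map (fun i => 2 * i + 1)
    let down := (PySem.List.pyRange (d - 1) (-1) (-1)).map (fun i => 2 * i + 1)
    up ++ [L] ++ down

def boundary_only_positions (L : Int) : List (Int × Int) :=
  let rows := diamond_row_sizes L
  let plateau_ys := ((PySem.List.enumerate rows 0).filter (fun p => p.2 == L)).map (fun p => p.1)
  match PySem.List.min? plateau_ys (fun y => y) with
  | none => []   -- Python raises ValueError here; outside Pre_
  | some y_first_max =>
      (PySem.List.enumerate rows 0).foldl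
        (fun b p =>
          if p.1 > y_first_max then
            PySem.Set.add b (-(PySem.Int.floordiv p.2 2), p.1)
          else
            PySem.Set.add b (PySem.Int.floordiv p.2 2, p.1))
        PySem.Set.empty

-- ===== PORT B =====
def boundary_only_positions_alt (L : Int) : List (Int × Int) :=
  if PySem.Int.mod L 2 = 0 ∨ L < 3 then []   -- Python raises ValueError here; outside Pre_
  else
    let d := PySem.Int.floordiv (L - 1) 2
    (PySem.List.pyRange 0 (L + 1) 1).foldl
      (fun b y =>
        let c := min y (L - y)
        PySem.Set.add b (if y > d then (-c, y) else (c, y)))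
      PySem.Set.empty

-- ===== PRECONDITION & SPEC =====
-- Pre_: exactly the inputs on which A returns (it raises ValueError when L is even or L < 3).
def Pre_boundary_only_positions (L : Int) : Prop := PySem.Int.mod L 2 ≠ 0 ∧ 3 ≤ L
instance (L : Int) : Decidable (Pre_boundary_only_positions L) := by
  unfold Pre_boundary_only_positions; infer_instance

def pvWitness_boundary_only_positions : Int := 5

def Spec_boundary_only_positions (L : Int) (out : List (Int × Int)) : Prop := out = boundary_only_positions_alt L
instance (L : Int) (out : List (Int × Int)) : Decidable (Spec_boundary_only_positions L out) := by unfold Spec_boundary_only_positions; infer_instance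

-- ===== CLAIM (what is proved, stated in full; the proofs are below) =====
def Claim_equal_boundary_only_positions : Prop := ∀ (L : Int), Dom_boundary_only_positions L → Pre_boundary_only_positions L → Spec_boundary_only_positions L (boundary_only_positions L)

-- ===== LEMMAS AND PROOFS =====

-- folding Set.add over fresh elements is just appending the mapped list
theorem foldl_set_add_fresh {β : Type} (xs : List β) (g : β → Int × Int)
    (acc : List (Int × Int))
    (hnd : (xs.map g).Nodup) (hfr : ∀ x ∈ xs, g x ∉ acc) :
    xs.foldl (fun b x => PySem.Set.add b (g x)) acc = acc ++ xs.map g := by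
  induction xs generalizing acc with
  | nil => simp
  | cons x t ih =>
      simp only [List.map_cons, List.nodup_cons] at hnd
      have hx : g x ∉ acc := hfr x (by simp)
      have : PySem.Set.add acc (g x) = acc ++ [g x] := by
        simp [PySem.Set.add, PySem.Set.contains, hx]
      simp only [List.foldl_cons, this]
      rw [ih (acc ++ [g x]) hnd.2 (by
        intro y hy
        simp only [List.mem_append, List.mem_singleton]
        push Not
        exact ⟨hfr y (by simp [hy]), fun h => hnd.1 (h ▸ List.mem_map_of_mem hy)⟩)]
      simp

-- A's row-size list written as an explicit append of range maps
theorem rows_eq (L d : Int) (hd : L = 2*d+1) (h1 : 1 ≤ d) :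
    diamond_row_sizes L =
      (List.range (d.toNat+1)).map (fun (k : Nat) => 2*(0+(k:Int))+1) ++ [L]
        ++ (List.range d.toNat).map (fun (t : Nat) => 2*((d-1)-(t:Int))+1) := by
  have hmod : PySem.Int.mod L 2 = 1 := by
    rw [PySem.Int.mod_eq_emod_of_pos (by norm_num)]; omega
  have hfd : PySem.Int.floordiv (L-1) 2 = d := by
    rw [PySem.Int.floordiv_eq_ediv_of_pos (by norm_num)]; omega
  simp only [diamond_row_sizes, hmod, hfd]
  rw [if_neg (by omega)]
  rw [PySem.List.pyRange_one, PySem.List.pyRange_neg_one]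
  have h1' : ((d:Int)+1-0).toNat = d.toNat+1 := by omega
  have h2' : ((d:Int)-1-(-1)).toNat = d.toNat := by omega
  rw [h1', h2', List.map_map, List.map_map]
  rfl

theorem rows_len (L d : Int) (hd : L = 2*d+1) (h1 : 1 ≤ d) :
    (diamond_row_sizes L).length = (L+1).toNat := by
  rw [rows_eq L d hd h1]
  simp; omega

theorem rows_get (L d : Int) (hd : L = 2*d+1) (h1 : 1 ≤ d) (k : Nat)
    (hk : k < (diamond_row_sizes L).length) :
    (diamond_row_sizes L)[k] = 2 * min (k:Int) (L - k) + 1 := by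
  have hlen := rows_len L d hd h1
  have hkL : (k:Int) < L + 1 := by omega
  rw [List.getElem_of_eq (rows_eq L d hd h1) hk]
  by_cases hc1 : k < d.toNat + 1
  · rw [List.getElem_append_left (by simp; omega), List.getElem_append_left (by simp; omega)]
    simp only [List.getElem_map, List.getElem_range]
    omega
  · by_cases hc2 : k = d.toNat + 1
    · rw [List.getElem_append_left (by simp; omega), List.getElem_append_right (by simp; omega)]
      simp only [List.length_map, List.length_range]
      have h0 : k - (d.toNat+1) = 0 := by omega
      simp [h0]
      omega
    · rw [List.getElem_append_right (by simp; omega)]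
      simp only [List.length_append, List.length_map, List.length_range, List.length_cons,
        List.length_nil, List.getElem_map, List.getElem_range]
      omega

-- membership in A's plateau list
theorem mem_plateau (L d : Int) (hd : L = 2*d+1) (h1 : 1 ≤ d) (y : Int) :
    (y ∈ ((PySem.List.enumerate (diamond_row_sizes L) 0).filter
        (fun p => p.2 == L)).map (fun p => p.1)) ↔ d ≤ y ∧ y ≤ d + 1 := by
  have hlen := rows_len L d hd h1
  constructor
  · rintro hy
    simp only [List.mem_map, List.mem_filter, PySem.List.mem_enumerate_iff] at hy
    obtain ⟨p, ⟨⟨k, hk, rfl⟩, hval⟩, rfl⟩ := hy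
    simp only [beq_iff_eq] at hval
    have := rows_get L d hd h1 k hk
    simp only [this] at hval
    constructor <;> [skip; skip] <;> simp only [zero_add] <;> omega
  · rintro ⟨hy1, hy2⟩
    simp only [List.mem_map, List.mem_filter, PySem.List.mem_enumerate_iff]
    have hyk : ∃ k : Nat, (k:Int) = y := ⟨y.toNat, by omega⟩
    obtain ⟨k, hk⟩ := hyk
    have hklt : k < (diamond_row_sizes L).length := by omega
    refine ⟨(0 + (k:Int), (diamond_row_sizes L)[k]), ⟨⟨k, hklt, rfl⟩, ?_⟩, by simpa using hk⟩
    simp only [beq_iff_eq, rows_get L d hd h1 k hklt]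
    omega

theorem boundary_only_positions_spec : Claim_equal_boundary_only_positions := by
  intro L _ hPre
  obtain ⟨hodd, hL3⟩ := hPre
  -- L = 2d+1 with d ≥ 1
  have hmodE : L % 2 = 1 := by
    have h2 := PySem.Int.mod_eq_emod_of_pos (a := L) (b := 2) (by norm_num)
    omega
  set d : Int := (L-1)/2 with hdDef
  have hd : L = 2*d+1 := by omega
  have h1 : 1 ≤ d := by omega
  have hmod : PySem.Int.mod L 2 = 1 := by
    rw [PySem.Int.mod_eq_emod_of_pos (by norm_num)]; omega
  have hfd : PySem.Int.floordiv (L-1) 2 = d := by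
    rw [PySem.Int.floordiv_eq_ediv_of_pos (by norm_num)]
  have hlen := rows_len L d hd h1
  -- the plateau minimum is d
  have hmin : PySem.List.min? (((PySem.List.enumerate (diamond_row_sizes L) 0).filter
      (fun p => p.2 == L)).map (fun p => p.1)) (fun y => y) = some d := by
    have hmem : d ∈ ((PySem.List.enumerate (diamond_row_sizes L) 0).filter
        (fun p => p.2 == L)).map (fun p => p.1) := by
      rw [mem_plateau L d hd h1]; omega
    rcases hsome : PySem.List.min? (((PySem.List.enumerate (diamond_row_sizes L) 0).filter
        (fun p => p.2 == L)).map (fun p => p.1)) (fun y => y) with _ | m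
    · exfalso
      rw [PySem.List.min?_eq_none_iff] at hsome
      rw [hsome] at hmem
      exact absurd hmem (List.not_mem_nil)
    · have h1m := PySem.List.min?_mem hsome
      rw [mem_plateau L d hd h1] at h1m
      have h2m := PySem.List.min?_isMin hsome d hmem
      rw [hsome]
      exact congrArg some (by omega)
  unfold Spec_boundary_only_positions boundary_only_positions boundary_only_positions_alt
  rw [if_neg (by omega)]
  dsimp only
  rw [hfd, hmin]
  dsimp only
  -- rewrite both loop bodies as Set.add of a single expression
  have hfunA : (fun (b : List (Int × Int)) (p : Int × Int) =>
      if p.1 > d then PySem.Set.add b (-(PySem.Int.floordiv p.2 2), p.1)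
      else PySem.Set.add b (PySem.Int.floordiv p.2 2, p.1))
      = fun b p => PySem.Set.add b
          (if p.1 > d then (-(PySem.Int.floordiv p.2 2), p.1)
           else (PySem.Int.floordiv p.2 2, p.1)) := by
    funext b p; split <;> rfl
  have hfunB : (fun (b : List (Int × Int)) (y : Int) =>
      let c := min y (L - y)
      PySem.Set.add b (if y > d then (-c, y) else (c, y)))
      = fun b y => PySem.Set.add b
          (if y > d then (-(min y (L-y)), y) else (min y (L-y), y)) := by
    funext b y; rfl
  rw [hfunA, hfunB]
  rw [foldl_set_add_fresh _ _ _ ?nodA (by intro x _ hx; simp [PySem.Set.empty] at hx)]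
  rw [foldl_set_add_fresh _ _ _ ?nodB (by intro x _ hx; simp [PySem.Set.empty] at hx)]
  case nodA =>
    have hpw := PySem.List.pairwise_lt_enumerate (xs := diamond_row_sizes L) (s := 0)
    rw [List.Nodup, List.pairwise_map]
    refine hpw.imp ?_
    intro p q hpq heq
    have : ((if p.1 > d then (-(PySem.Int.floordiv p.2 2), p.1)
        else (PySem.Int.floordiv p.2 2, p.1)) : Int × Int).2 = p.1 := by split <;> rfl
    have hq : ((if q.1 > d then (-(PySem.Int.floordiv q.2 2), q.1)
        else (PySem.Int.floordiv q.2 2, q.1)) : Int × Int).2 = q.1 := by split <;> rfl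
    rw [heq, hq] at this
    omega
  case nodB =>
    have hpw := PySem.List.pairwise_lt_pyRange_one (a := 0) (b := L + 1)
    rw [List.Nodup, List.pairwise_map]
    refine hpw.imp ?_
    intro y z hyz heq
    have : ((if y > d then (-(min y (L-y)), y) else (min y (L-y), y)) : Int × Int).2 = y := by
      split <;> rfl
    have hz : ((if z > d then (-(min z (L-z)), z) else (min z (L-z), z)) : Int × Int).2 = z := by
      split <;> rfl
    rw [heq, hz] at this
    omega
  -- both folds are now maps over the same index range; compare elementwise
  simp only [PySem.Set.empty, List.nil_append]
  apply List.ext_getElem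
  · simp [PySem.List.length_enumerate, hlen, PySem.List.length_pyRange_one]
  · intro k hk1 hk2
    simp only [List.getElem_map, PySem.List.getElem_enumerate, PySem.List.getElem_pyRange_one]
    have hklen : k < (diamond_row_sizes L).length := by
      simp [PySem.List.length_enumerate] at hk1; omega
    rw [rows_get L d hd h1 k hklen]
    have hkL : (k:Int) ≤ L := by omega
    have hmn : 0 ≤ min (k:Int) (L - k) := by omega
    have hflr : PySem.Int.floordiv (2 * min (k:Int) (L - k) + 1) 2 = min (k:Int) (L - k) := by
      rw [PySem.Int.floordiv_eq_ediv_of_pos (by norm_num)]; omega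
    simp only [zero_add, hflr]
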